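-- pv_equiv track=rewrite | github.com/zhongruiw/RegimeSurrogate | code/CG/selecandies.py | physi_constrain
-- ===== SOURCE A (Python) =====
-- def physi_constrain(a):
--     result = []
--     passset = ['x^2','y^2','z^2','xy','xz','yz','x^4','y^4','z^4']
--     for i, row in enumerate(a):
--         # Combine all other rows except current row
--         other_rows = [item for j, other_row in enumerate(a) if j != i for item in other_row]
--         # Keep the elements if they appear in other rows
--         filtered_row = [elem for elem in row if elem in other_rows or elem in passset]
--         result.append(filtered_row)
--
--     return result
-- ===== SOURCE B (Python) =====
-- def physi_constrain(a):
--     # One pass to count every element globally, then one pass per row with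
--     # that row's own counts: elem appears in some OTHER row iff its global
--     # count exceeds its count within the current row.
--     passset = {'x^2', 'y^2', 'z^2', 'xy', 'xz', 'yz', 'x^4', 'y^4', 'z^4'}
--     total = {}
--     for row in a:
--         for e in row:
--             total[e] = total.get(e, 0) + 1
--     result = []
--     for row in a:
--         rc = {}
--         for e in row:
--             rc[e] = rc.get(e, 0) + 1
--         result.append([e for e in row if e in passset or rc.get(e, 0) < total.get(e, 0)])
--     return result
-- ===== Notes on version B (the rewrite author's own statement) =====
-- stated objective: faster
-- what changed: Replaces the per-row rebuild of all other rows and the linear membership scan for each element by one global count dict plus a per-row count dict: an element survives iff it is in the pass set or its global count exceeds its in-row count.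
import Mathlib
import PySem

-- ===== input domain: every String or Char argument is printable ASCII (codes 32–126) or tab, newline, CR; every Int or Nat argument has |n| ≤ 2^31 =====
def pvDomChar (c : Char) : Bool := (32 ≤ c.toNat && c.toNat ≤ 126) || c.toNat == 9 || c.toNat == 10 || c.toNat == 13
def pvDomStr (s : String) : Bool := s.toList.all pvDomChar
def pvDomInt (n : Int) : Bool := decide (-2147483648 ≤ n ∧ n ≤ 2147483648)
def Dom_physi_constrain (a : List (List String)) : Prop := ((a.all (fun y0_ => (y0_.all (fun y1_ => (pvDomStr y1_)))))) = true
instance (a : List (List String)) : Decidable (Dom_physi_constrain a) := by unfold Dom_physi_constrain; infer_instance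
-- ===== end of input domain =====

-- B changes the algorithm: global + per-row element counts instead of rebuilding and scanning all other rows per element (faster, asymptotic).

-- ===== PORT A =====
def pvPasslist : List String := ["x^2","y^2","z^2","xy","xz","yz","x^4","y^4","z^4"]

-- other_rows for iteration index i: all items of rows whose index ≠ i
def pvOther (a : List (List String)) (i : Int) : List String :=
  ((PySem.List.enumerate a).filter (fun p => decide (p.1 ≠ i))).flatMap (fun p => p.2)

def physi_constrain (a : List (List String)) : List (List String) :=
  (PySem.List.enumerate a).foldl
    (fun result p =>
      let other_rows := pvOther a p.1
      let filtered_row := p.2.filter (fun e => other_rows.contains e || pvPasslist.contains e)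
      result ++ [filtered_row]) []

-- ===== PORT B =====
-- one counting step: d[e] = d.get(e, 0) + 1
def pvCountStep (d : PySem.Dict String Int) (e : String) : PySem.Dict String Int :=
  d.insert e (d.getD e 0 + 1)

def physi_constrain_alt (a : List (List String)) : List (List String) :=
  let passset : PySem.Set String := PySem.Set.ofList ["x^2","y^2","z^2","xy","xz","yz","x^4","y^4","z^4"]
  let total := a.foldl (fun d row => row.foldl pvCountStep d) PySem.Dict.empty
  a.foldl
    (fun result row =>
      let rc := row.foldl pvCountStep PySem.Dict.empty
      result ++ [row.filter (fun e => passset.contains e || decide (rc.getD e 0 < total.getD e 0))]) []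

-- ===== PRECONDITION & SPEC =====
def Spec_physi_constrain (a : List (List String)) (out : List (List String)) : Prop := out = physi_constrain_alt a
instance (a : List (List String)) (out : List (List String)) : Decidable (Spec_physi_constrain a out) := by unfold Spec_physi_constrain; infer_instance

-- ===== CLAIM (what is proved, stated in full; the proofs are below) =====
def Claim_equal_physi_constrain : Prop := ∀ (a : List (List String)), Dom_physi_constrain a → Spec_physi_constrain a (physi_constrain a)

-- ===== LEMMAS AND PROOFS =====

-- counting loop: getD of the counting fold adds the list count
theorem pv_getD_countfold (row : List String) (d : PySem.Dict String Int) (v : String) :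
    (row.foldl pvCountStep d).getD v 0 = d.getD v 0 + (row.count v : Int) := by
  induction row generalizing d with
  | nil => simp
  | cons x xs ih =>
    simp only [List.foldl_cons, ih, pvCountStep, PySem.Dict.getD_insert, List.count_cons]
    by_cases h : v = x
    · simp only [h, beq_self_eq_true, if_true]
      push_cast; ring
    · have hx : ¬ x = v := fun hh => h hh.symm
      simp [if_neg h, if_neg hx]

-- nested counting loop over all rows counts the flattened list
theorem pv_getD_totalfold (a : List (List String)) (d : PySem.Dict String Int) (v : String) :
    (a.foldl (fun d row => row.foldl pvCountStep d) d).getD v 0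
      = d.getD v 0 + ((a.flatMap id).count v : Int) := by
  induction a generalizing d with
  | nil => simp
  | cons r rest ih =>
    simp only [List.foldl_cons, ih, pv_getD_countfold, List.flatMap_cons, List.count_append, id]
    push_cast; ring

theorem pv_enumerate_fst_ge {α : Type} (xs : List α) (s i : Int) (x : α)
    (h : (i, x) ∈ PySem.List.enumerate xs s) : s ≤ i := by
  induction xs generalizing s with
  | nil => simp [PySem.List.enumerate_nil] at h
  | cons y ys ih =>
    rw [PySem.List.enumerate_cons] at h
    rcases List.mem_cons.mp h with h | h
    · cases h; omega
    · have := ih (s + 1) h; omega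

-- the elements of the other rows plus the current row are exactly the flattened list (count-wise)
theorem pv_other_count (a : List (List String)) (s i : Int) (row : List String) (e : String)
    (h : (i, row) ∈ PySem.List.enumerate a s) :
    ((((PySem.List.enumerate a s).filter (fun p => decide (p.1 ≠ i))).flatMap (fun p => p.2)).count e)
      + row.count e = (a.flatMap id).count e := by
  induction a generalizing s with
  | nil => simp [PySem.List.enumerate_nil] at h
  | cons r rest ih =>
    rw [PySem.List.enumerate_cons] at h ⊢
    rcases List.mem_cons.mp h with h | h
    · obtain ⟨rfl, rfl⟩ := Prod.mk.inj h
      have hkeep : (PySem.List.enumerate rest (i + 1)).filter (fun p => decide (p.1 ≠ i))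
          = PySem.List.enumerate rest (i + 1) := by
        apply List.filter_eq_self.mpr
        intro p hp
        have := pv_enumerate_fst_ge rest (i + 1) p.1 p.2 (by simpa using hp)
        simp; omega
      have hsnd : (PySem.List.enumerate rest (i + 1)).flatMap (fun p => p.2) = rest.flatten := by
        rw [List.flatMap_def, PySem.List.map_snd_enumerate]
      rw [List.filter_cons_of_neg (by simp), hkeep, hsnd]
      simp [List.count_append, Nat.add_comm]
    · have hge := pv_enumerate_fst_ge rest (s + 1) i row h
      have hne : s ≠ i := by omega
      rw [List.filter_cons_of_pos (by simp [hne])]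
      simp only [List.flatMap_cons, List.count_append, id]
      have := ih (s + 1) h
      omega

-- pointwise equality of the two per-element tests, for (i, row) an entry of enumerate a
theorem pv_pred_eq (a : List (List String)) (i : Int) (row : List String)
    (h : (i, row) ∈ PySem.List.enumerate a 0) (e : String) :
    ((pvOther a i).contains e || pvPasslist.contains e)
      = ((PySem.Set.ofList ["x^2","y^2","z^2","xy","xz","yz","x^4","y^4","z^4"]).contains e
          || decide ((row.foldl pvCountStep PySem.Dict.empty).getD e 0
              < (a.foldl (fun d row => row.foldl pvCountStep d) PySem.Dict.empty).getD e 0)) := by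
  have hset : PySem.Set.ofList ["x^2","y^2","z^2","xy","xz","yz","x^4","y^4","z^4"] = pvPasslist := by decide
  rw [hset, Bool.or_comm]
  congr 1
  have hkey := pv_other_count a 0 i row e h
  have hrc : (row.foldl pvCountStep PySem.Dict.empty).getD e 0 = (row.count e : Int) := by
    simpa using pv_getD_countfold row PySem.Dict.empty e
  have htot := pv_getD_totalfold a PySem.Dict.empty e
  simp only [PySem.Dict.getD_empty] at htot hrc
  rw [show (0 : Int) + ((a.flatMap id).count e : Int) = ((a.flatMap id).count e : Int) by ring] at htot
  by_cases hm : e ∈ pvOther a i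
  · have hpos : 0 < (pvOther a i).count e := List.count_pos_iff.mpr hm
    have : (row.foldl pvCountStep PySem.Dict.empty).getD e 0
        < (a.foldl (fun d row => row.foldl pvCountStep d) PySem.Dict.empty).getD e 0 := by
      rw [hrc, htot]
      have : row.count e < (a.flatMap id).count e := by
        unfold pvOther at hpos; omega
      exact_mod_cast this
    simp [hm, this]
  · have hz : (pvOther a i).count e = 0 := by
      by_contra hc
      exact hm (List.count_pos_iff.mp (Nat.pos_of_ne_zero hc))
    have : ¬ (row.foldl pvCountStep PySem.Dict.empty).getD e 0
        < (a.foldl (fun d row => row.foldl pvCountStep d) PySem.Dict.empty).getD e 0 := by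
      rw [hrc, htot]
      have : (a.flatMap id).count e ≤ row.count e := by
        unfold pvOther at hz; omega
      exact not_lt.mpr (by exact_mod_cast this)
    simp [hm, this]

-- ===== VERDICT (by name: the statement is the Claim_ definition above) =====
theorem physi_constrain_spec : Claim_equal_physi_constrain := by
  intro a _
  unfold Spec_physi_constrain physi_constrain physi_constrain_alt
  simp only [PySem.List.foldl_append_singleton_eq_map, List.nil_append]
  refine Eq.trans (List.map_congr_left ?_)
    (by rw [← List.map_map]; rw [PySem.List.map_snd_enumerate])
  intro p hp
  simp only [Function.comp]
  exact List.filter_congr (fun e _ => pv_pred_eq a p.1 p.2 (by simpa using hp) e)
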